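-- pv_equiv track=rewrite | github.com/MrBrantCode/unitest_baseline | mut_generate/mist_train_cf/cf_95383/solution.py | iterate_and_add
-- ===== SOURCE A (Python) =====
-- def iterate_and_add(list_of_numbers):
--     total = 0
--     negative_count = 0
--
--     for number in list_of_numbers:
--         total += int(number)
--         if number < 0:
--             negative_count += 1
--
--     return round(total), negative_count
-- ===== SOURCE B (Python) =====
-- def iterate_and_add(list_of_numbers):
--     # Sort a copy; the sum is order-independent, and the negative count is
--     # then the index of the first non-negative element, found by binary search.
--     s = sorted(list_of_numbers)
--     lo, hi = 0, len(s)
--     while lo < hi: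
--         mid = (lo + hi) // 2
--         if s[mid] < 0:
--             lo = mid + 1
--         else:
--             hi = mid
--     total = 0
--     for number in s:
--         total += int(number)
--     return round(total), lo
-- ===== Notes on version B (the rewrite author's own statement) =====
-- stated objective: alternative
-- what changed: Instead of A's fused accumulator loop, B sorts the list, obtains the negative count as the index of the first non-negative element via hand-written binary search, and sums over the sorted copy (sum is permutation-invariant).
import Mathlib
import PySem

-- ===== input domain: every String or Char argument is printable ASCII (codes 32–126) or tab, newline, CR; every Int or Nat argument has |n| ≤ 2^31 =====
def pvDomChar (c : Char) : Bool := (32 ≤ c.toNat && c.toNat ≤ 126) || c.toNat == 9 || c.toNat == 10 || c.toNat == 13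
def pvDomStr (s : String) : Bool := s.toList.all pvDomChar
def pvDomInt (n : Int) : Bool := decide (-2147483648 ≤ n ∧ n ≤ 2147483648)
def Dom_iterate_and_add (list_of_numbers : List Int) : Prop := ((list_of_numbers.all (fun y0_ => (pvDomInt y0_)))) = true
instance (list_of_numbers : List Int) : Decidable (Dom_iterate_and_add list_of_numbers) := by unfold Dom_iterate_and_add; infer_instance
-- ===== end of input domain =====

-- B replaces A's fused accumulator loop by sort + binary search for the first
-- non-negative element (the negative count) + a sum over the sorted copy; alternative, not faster.

-- ===== PORT A =====
-- fused loop: one foldl carrying (total, negative_count); int(number)/round(total) are identities on Int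
def iterate_and_add (list_of_numbers : List Int) : Int × Int :=
  list_of_numbers.foldl
    (fun (st : Int × Int) number =>
      (st.1 + number, if number < 0 then st.2 + 1 else st.2))
    (0, 0)

-- ===== PORT B =====
-- Source B's while-loop binary search; lo, hi stay in [0, len s], so Nat and
-- (lo+hi)/2 coincide with Python's ints and //; s[mid] is in range whenever
-- lo < hi ≤ len s, so getD mid 0 is exact there.
def pvBsearchNeg (s : List Int) (lo hi : Nat) : Nat :=
  if lo < hi then
    let mid := (lo + hi) / 2
    if s.getD mid 0 < 0 then pvBsearchNeg s (mid + 1) hi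
    else pvBsearchNeg s lo mid
  else lo
termination_by hi - lo
decreasing_by all_goals omega

def iterate_and_add_alt (list_of_numbers : List Int) : Int × Int :=
  let s := PySem.List.sorted list_of_numbers (fun x => x) false
  let lo := pvBsearchNeg s 0 s.length
  let total := s.foldl (fun t number => t + number) 0
  (total, (lo : Int))

-- ===== PRECONDITION & SPEC =====
def Spec_iterate_and_add (list_of_numbers : List Int) (out : Int × Int) : Prop := out = iterate_and_add_alt list_of_numbers
instance (list_of_numbers : List Int) (out : Int × Int) : Decidable (Spec_iterate_and_add list_of_numbers out) := by unfold Spec_iterate_and_add; infer_instance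

-- ===== CLAIM (what is proved, stated in full; the proofs are below) =====
def Claim_equal_iterate_and_add : Prop := ∀ (list_of_numbers : List Int), Dom_iterate_and_add list_of_numbers → Spec_iterate_and_add list_of_numbers (iterate_and_add list_of_numbers)

-- ===== LEMMAS AND PROOFS =====
-- loop invariant for A: the fold from any state (t, c) adds the sum and the negative count
theorem iterate_and_add_fold (l : List Int) (t c : Int) :
    l.foldl (fun (st : Int × Int) number =>
      (st.1 + number, if number < 0 then st.2 + 1 else st.2)) (t, c)
    = (t + l.sum, c + ((l.filter (fun n => n < 0)).length : Int)) := by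
  induction l generalizing t c with
  | nil => simp
  | cons x xs ih =>
    simp only [List.foldl_cons, List.sum_cons, List.filter_cons, ih]
    by_cases h : x < 0 <;> simp [h, Prod.ext_iff] <;> omega

-- in a ≤-sorted list, negatives form a prefix: s[i] < 0 iff i < #negatives
theorem neg_prefix (s : List Int) (hs : s.Pairwise (fun a b => a ≤ b)) :
    ∀ i, i < s.length → (s.getD i 0 < 0 ↔ i < (s.filter (fun n => n < 0)).length) := by
  induction s with
  | nil => intro i hi; simp at hi
  | cons x xs ih =>
    rcases List.pairwise_cons.mp hs with ⟨hx, hxs⟩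
    intro i hi
    by_cases hneg : x < 0
    · cases i with
      | zero => simp [hneg]
      | succ j =>
        have hj : j < xs.length := by simpa using hi
        have ht := ih hxs j hj
        simp only [List.getD_cons_succ, List.filter_cons, hneg, decide_true, if_pos,
          List.length_cons]
        rw [ht]
        omega
    · have h0 : ∀ a ∈ x :: xs, ¬ a < 0 := by
        intro a ha
        rcases List.mem_cons.mp ha with rfl | ha'
        · exact hneg
        · have := hx a ha'; omega
      have hfil : (x :: xs).filter (fun n => n < 0) = [] :=
        List.filter_eq_nil_iff.mpr (by intro a ha; simpa using h0 a ha)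
      rw [hfil]
      simp only [List.length_nil]
      constructor
      · intro h
        exfalso
        cases i with
        | zero => exact hneg (by simpa using h)
        | succ j =>
          have hj : j < xs.length := by simpa using hi
          have hmem : xs.getD j 0 ∈ xs := by
            rw [List.getD_eq_getElem xs 0 hj]; exact List.getElem_mem hj
          exact h0 _ (List.mem_cons_of_mem x hmem) (by simpa using h)
      · intro h; omega

-- correctness of the binary search on a sorted list
theorem pvBsearchNeg_eq (s : List Int) (hs : s.Pairwise (fun a b => a ≤ b)) :
    ∀ lo hi, lo ≤ (s.filter (fun n => n < 0)).length →
      (s.filter (fun n => n < 0)).length ≤ hi → hi ≤ s.length →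
      pvBsearchNeg s lo hi = (s.filter (fun n => n < 0)).length := by
  intro lo hi
  fun_induction pvBsearchNeg s lo hi with
  | case1 lo hi hlt mid hmidneg ih =>
    intro h1 h2 h3
    have hmid : mid < s.length := by omega
    have := (neg_prefix s hs mid hmid).mp hmidneg
    exact ih (by omega) h2 h3
  | case2 lo hi hlt mid hmidneg ih =>
    intro h1 h2 h3
    have hmid : mid < s.length := by omega
    have hk : ¬ mid < (s.filter (fun n => n < 0)).length :=
      fun hk => hmidneg ((neg_prefix s hs mid hmid).mpr hk)
    exact ih h1 (by omega) (by omega)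
  | case3 lo hi hge =>
    intro h1 h2 h3; omega

-- ===== VERDICT (by name: the statement is the Claim_ definition above) =====
theorem iterate_and_add_spec : Claim_equal_iterate_and_add := by
  intro l _
  unfold Spec_iterate_and_add iterate_and_add iterate_and_add_alt
  rw [iterate_and_add_fold]
  have hperm : (PySem.List.sorted l (fun x => x) false).Perm l := PySem.List.sorted_perm l _ _
  have hpw : (PySem.List.sorted l (fun x => x) false).Pairwise (fun a b => a ≤ b) := by
    simpa using PySem.List.sorted_pairwise l (fun x => x)
  have hbs := pvBsearchNeg_eq _ hpw 0 (PySem.List.sorted l (fun x => x) false).length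
    (Nat.zero_le _) (List.length_filter_le _ _) (Nat.le_refl _)
  simp only [hbs]
  have hsum : (PySem.List.sorted l (fun x => x) false).foldl (fun t number => t + number) 0
      = l.sum := by
    rw [← List.sum_eq_foldl] at *
    exact hperm.sum_eq
  have hcnt : ((PySem.List.sorted l (fun x => x) false).filter (fun n => n < 0)).length
      = (l.filter (fun n => n < 0)).length :=
    (hperm.filter _).length_eq
  simp [hsum, hcnt]
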